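-- pv_equiv track=rewrite | github.com/Dstrand10/hobby-projects | AdventOfCode2022/Day25/Day25.py | to_decimal
-- ===== SOURCE A (Python) =====
-- def to_decimal(data):
--     ans = 0
--     for row in data:
--         i = 0
--         while row:
--             char = row[-1]
--             row = row[:-1]
--             if char == "=":
--                 ans += -2 * 5 ** i
--             elif char == "-":
--                 ans += -1 * 5 ** i
--             elif char == "1":
--                 ans += 1 * 5 ** i
--             elif char == "2":
--                 ans += 2 * 5 ** i
--             i += 1
--     return ans
-- ===== SOURCE B (Python) =====
-- def to_decimal(data):
--     digits = {"=": -2, "-": -1, "1": 1, "2": 2}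
--     ans = 0
--     for row in data:
--         v = 0
--         for ch in row:
--             v = v * 5 + digits.get(ch, 0)
--         ans += v
--     return ans
-- ===== Notes on version B (the rewrite author's own statement) =====
-- stated objective: faster
-- what changed: Replaces the per-row while-loop that repeatedly slices off the last character and computes 5**i with a single left-to-right Horner pass (v = v*5 + digit) over each row.
import Mathlib
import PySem

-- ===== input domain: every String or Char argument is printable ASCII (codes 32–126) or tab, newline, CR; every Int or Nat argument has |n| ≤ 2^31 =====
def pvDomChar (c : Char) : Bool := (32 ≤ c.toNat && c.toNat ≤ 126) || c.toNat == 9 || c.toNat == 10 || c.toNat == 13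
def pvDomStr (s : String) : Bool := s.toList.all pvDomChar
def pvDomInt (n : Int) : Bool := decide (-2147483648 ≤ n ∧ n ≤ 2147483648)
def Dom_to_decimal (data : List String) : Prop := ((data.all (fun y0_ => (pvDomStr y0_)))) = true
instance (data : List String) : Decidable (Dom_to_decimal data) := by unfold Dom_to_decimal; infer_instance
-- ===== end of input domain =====

-- B replaces A's backwards slice-and-power-of-5 loop with a single left-to-right Horner pass per row (asymptotically faster).

-- ===== PORT A =====
-- A's inner while-loop: takes row[-1], drops it (row[:-1]), adds digit * 5 ** i, i += 1.
def to_decimal_rowLoop (row : List Char) (i : Nat) (ans : Int) : Int :=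
  if h : row = [] then ans
  else
    let char := row.getLast h
    let row' := row.dropLast
    let ans' :=
      if char = '=' then ans + (-2) * (5 : Int) ^ i
      else if char = '-' then ans + (-1) * (5 : Int) ^ i
      else if char = '1' then ans + 1 * (5 : Int) ^ i
      else if char = '2' then ans + 2 * (5 : Int) ^ i
      else ans
    to_decimal_rowLoop row' (i + 1) ans'
termination_by row.length
decreasing_by
  have hp : 0 < row.length := List.length_pos_of_ne_nil h
  simp [List.length_dropLast]
  omega

def to_decimal (data : List String) : Int :=
  data.foldl (fun ans row => to_decimal_rowLoop row.toList 0 ans) 0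

-- ===== PORT B =====
-- digits.get(ch, 0)
def to_decimal_digit (c : Char) : Int :=
  (PySem.Dict.ofList [('=', (-2 : Int)), ('-', -1), ('1', 1), ('2', 2)]).getD c 0

-- Horner pass: v = v * 5 + digits.get(ch, 0)
def to_decimal_alt (data : List String) : Int :=
  data.foldl (fun ans row => ans + row.toList.foldl (fun v ch => v * 5 + to_decimal_digit ch) 0) 0

-- ===== PRECONDITION & SPEC =====
def Spec_to_decimal (data : List String) (out : Int) : Prop := out = to_decimal_alt data
instance (data : List String) (out : Int) : Decidable (Spec_to_decimal data out) := by unfold Spec_to_decimal; infer_instance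

-- ===== CLAIM (what is proved, stated in full; the proofs are below) =====
def Claim_equal_to_decimal : Prop := ∀ (data : List String), Dom_to_decimal data → Spec_to_decimal data (to_decimal data)

-- ===== LEMMAS AND PROOFS =====
theorem rowLoop_eq_horner (row : List Char) (i : Nat) (ans : Int) :
    to_decimal_rowLoop row i ans
      = ans + (row.foldl (fun v ch => v * 5 + to_decimal_digit ch) 0) * 5 ^ i := by
  induction row using List.reverseRecOn generalizing i ans with
  | nil => simp [to_decimal_rowLoop]
  | append_singleton ys y ih =>
    rw [to_decimal_rowLoop]
    simp only [dif_neg (by simp : ys ++ [y] ≠ []), List.getLast_append,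
      List.dropLast_concat, List.foldl_append, List.foldl_cons, List.foldl_nil,
      List.isEmpty_cons, Bool.false_eq_true, dite_false, List.getLast_singleton]
    rw [ih]
    have hd : ∀ c : Char, to_decimal_digit c =
        if c = '=' then -2 else if c = '-' then -1 else if c = '1' then 1
        else if c = '2' then 2 else 0 := by
      intro c
      by_cases h1 : c = '='
      · subst h1; rfl
      by_cases h2 : c = '-'
      · subst h2; rfl
      by_cases h3 : c = '1'
      · subst h3; rfl
      by_cases h4 : c = '2'
      · subst h4; rfl
      have b1 : (('=' : Char) == c) = false := beq_eq_false_iff_ne.mpr (fun h => h1 h.symm)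
      have b2 : (('-' : Char) == c) = false := beq_eq_false_iff_ne.mpr (fun h => h2 h.symm)
      have b3 : (('1' : Char) == c) = false := beq_eq_false_iff_ne.mpr (fun h => h3 h.symm)
      have b4 : (('2' : Char) == c) = false := beq_eq_false_iff_ne.mpr (fun h => h4 h.symm)
      rw [show to_decimal_digit c
          = (({ items := [('=', -2), ('-', -1), ('1', 1), ('2', 2)] } :
              PySem.Dict Char Int).getD c 0) from rfl]
      simp [PySem.Dict.getD, PySem.Dict.get?, List.find?,
        b1, b2, b3, b4, h1, h2, h3, h4]
    rw [hd y]
    split_ifs <;> ring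

-- ===== VERDICT (by name: the statement is the Claim_ definition above) =====
theorem to_decimal_spec : Claim_equal_to_decimal := by
  intro data hdom
  clear hdom
  unfold Spec_to_decimal to_decimal to_decimal_alt
  induction data using List.reverseRecOn with
  | nil => rfl
  | append_singleton ys y ih =>
    simp only [List.foldl_append, List.foldl_cons, List.foldl_nil]
    rw [ih, rowLoop_eq_horner]
    ring
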